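-- pv_equiv track=rewrite | github.com/D1egoSebastian/DeadAnts-1n- | deadants/deadants.py | antsfunction
-- ===== SOURCE A (Python) =====
-- def antsfunction(ants):
--     a_counter = 0
--     n_counter = 0
--     t_counter = 0
--     ant_counter = 0
--
--     for i in range(len(ants)):
--         if ants[i] == 'a' and (i >= len(ants) - 2 or ants[i+1:i+3] != 'nt'):
--             a_counter += 1
--
--         elif ants[i] == 'n' and (i >= len(ants) - 2 or ants[i+1:i+3] != 'ta'):
--             n_counter += 1
--
--         elif ants[i] == 't' and (i >= len(ants) - 1 or ants[i+1] != 'a'):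
--             t_counter += 1
--
--         elif i < len(ants) - 2 and ants[i:i+3] == 'ant':
--            ant_counter += 1
--
--
--     count = max(a_counter, n_counter, t_counter) - ant_counter
--     return count
-- ===== SOURCE B (Python) =====
-- def antsfunction(ants):
--     ant = ants.count('ant')
--     a = ants.count('a') - ant
--     n = ants.count('n') - ants.count('nta')
--     t = ants.count('t') - ants.count('ta')
--     return max(a, n, t) - ant
-- ===== Notes on version B (the rewrite author's own statement) =====
-- stated objective: faster
-- what changed: Replaces A's single indexed loop with four elif branches and slice comparisons by four str.count library scans combined in a closed arithmetic formula (each branch's exclusion corresponds to the non-self-overlapping substring 'ant', 'nta' or 'ta').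
import Mathlib
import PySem

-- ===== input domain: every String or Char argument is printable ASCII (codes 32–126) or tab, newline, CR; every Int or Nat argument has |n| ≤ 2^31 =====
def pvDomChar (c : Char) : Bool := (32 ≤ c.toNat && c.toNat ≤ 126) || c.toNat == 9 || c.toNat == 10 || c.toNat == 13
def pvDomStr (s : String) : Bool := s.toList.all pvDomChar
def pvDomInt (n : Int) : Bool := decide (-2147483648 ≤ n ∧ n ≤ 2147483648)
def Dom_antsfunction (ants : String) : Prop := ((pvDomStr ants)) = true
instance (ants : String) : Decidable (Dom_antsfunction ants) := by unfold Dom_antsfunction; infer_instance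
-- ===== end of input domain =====

-- B replaces A's single indexed loop with four branches by a few str.count library scans
-- combined arithmetically (objective: faster; a timing run measured B faster by a constant factor).

-- ===== PORT A =====
-- the body of A's for-loop at index i, acting on the 4 counters (a, n, t, ant)
def antsStep (cs : List Char) (st : Int × Int × Int × Int) (i : Int) : Int × Int × Int × Int :=
  let a := st.1; let n := st.2.1; let t := st.2.2.1; let ant := st.2.2.2
  if PySem.List.pyGetD cs i ' ' = 'a' ∧
      (i ≥ PySem.List.len cs - 2 ∨ PySem.List.slice cs (some (i+1)) (some (i+3)) ≠ ['n','t']) then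
    (a + 1, n, t, ant)
  else if PySem.List.pyGetD cs i ' ' = 'n' ∧
      (i ≥ PySem.List.len cs - 2 ∨ PySem.List.slice cs (some (i+1)) (some (i+3)) ≠ ['t','a']) then
    (a, n + 1, t, ant)
  else if PySem.List.pyGetD cs i ' ' = 't' ∧
      (i ≥ PySem.List.len cs - 1 ∨ PySem.List.pyGetD cs (i+1) ' ' ≠ 'a') then
    (a, n, t + 1, ant)
  else if i < PySem.List.len cs - 2 ∧ PySem.List.slice cs (some i) (some (i+3)) = ['a','n','t'] then
    (a, n, t, ant + 1)
  else
    (a, n, t, ant)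


def antsfunction (ants : String) : Int :=
  let cs := ants.toList
  let st := (PySem.List.pyRange 0 (PySem.List.len cs) 1).foldl (antsStep cs) (0, 0, 0, 0)
  max (max st.1 st.2.1) st.2.2.1 - st.2.2.2

-- ===== PORT B =====
def antsfunction_alt (ants : String) : Int :=
  let ant : Int := PySem.Str.count ants "ant"
  let a : Int := (PySem.Str.count ants "a" : Int) - ant
  let n : Int := (PySem.Str.count ants "n" : Int) - (PySem.Str.count ants "nta" : Int)
  let t : Int := (PySem.Str.count ants "t" : Int) - (PySem.Str.count ants "ta" : Int)
  max (max a n) t - ant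

-- ===== PRECONDITION & SPEC =====
def Spec_antsfunction (ants : String) (out : Int) : Prop := out = antsfunction_alt ants
instance (ants : String) (out : Int) : Decidable (Spec_antsfunction ants out) := by unfold Spec_antsfunction; infer_instance

-- ===== CLAIM (what is proved, stated in full; the proofs are below) =====
def Claim_equal_antsfunction : Prop := ∀ (ants : String), Dom_antsfunction ants → Spec_antsfunction ants (antsfunction ants)

-- ===== LEMMAS AND PROOFS =====
def occCnt (sub : List Char) : List Char → Nat
  | [] => 0
  | c :: t => (if sub.isPrefixOf (c :: t) then 1 else 0) + occCnt sub t

theorem go_eq (sub : List Char) (hsub : sub ≠ [])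
    (hskip : ∀ l : List Char, sub.isPrefixOf l = true →
      occCnt sub l = 1 + occCnt sub (l.drop sub.length)) :
    ∀ (fuel : Nat) (l : List Char) (acc : Nat), l.length ≤ fuel →
      PySem.Chars.count.go sub fuel l acc = acc + occCnt sub l := by
  have hs1 : 1 ≤ sub.length := by cases sub <;> simp_all
  intro fuel
  induction fuel with
  | zero =>
    intro l acc h
    have hl : l = [] := by cases l <;> simp_all
    subst hl; simp [PySem.Chars.count.go, occCnt]
  | succ f ih =>
    intro l acc h
    cases l with
    | nil => simp [PySem.Chars.count.go, occCnt]
    | cons c t =>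
      rw [PySem.Chars.count.go]
      by_cases hp : sub.isPrefixOf (c :: t)
      · rw [if_pos hp, ih _ _ (by rw [List.length_drop]; simp at h ⊢; omega), hskip _ hp]
        omega
      · rw [if_neg hp, ih _ _ (by simp at h ⊢; omega)]
        simp [occCnt, hp]

theorem count_eq_occCnt (sub cs : List Char) (hsub : sub ≠ [])
    (hskip : ∀ l : List Char, sub.isPrefixOf l = true →
      occCnt sub l = 1 + occCnt sub (l.drop sub.length)) :
    PySem.Chars.count cs sub = occCnt sub cs := by
  rw [PySem.Chars.count, if_neg (by simp [hsub])]
  simpa using go_eq sub hsub hskip cs.length cs 0 le_rfl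

theorem antsStep_zero (c : Char) (t : List Char) (st : Int × Int × Int × Int) :
    antsStep (c :: t) st 0 =
      if c = 'a' ∧ ¬ ['n','t'].isPrefixOf t then (st.1 + 1, st.2.1, st.2.2.1, st.2.2.2)
      else if c = 'n' ∧ ¬ ['t','a'].isPrefixOf t then (st.1, st.2.1 + 1, st.2.2.1, st.2.2.2)
      else if c = 't' ∧ ¬ ['a'].isPrefixOf t then (st.1, st.2.1, st.2.2.1 + 1, st.2.2.2)
      else if ['a','n','t'].isPrefixOf (c :: t) then (st.1, st.2.1, st.2.2.1, st.2.2.2 + 1)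
      else st := by
  have r0 : PySem.List.pyGetD (c :: t) 0 ' ' = c := by
    simp [PySem.List.pyGetD_zero_cons]
  have r1 : PySem.List.pyGetD (c :: t) (0+1) ' ' = t.getD 0 ' ' := by
    rw [PySem.List.pyGetD_of_nonneg _ _ (by omega)]; rfl
  have s1 : PySem.List.slice (c :: t) (some (0+1)) (some (0+3)) = t.take 2 := by
    rw [PySem.List.slice_toNat _ (by omega) (by omega)]; rfl
  have s2 : PySem.List.slice (c :: t) (some 0) (some (0+3)) = (c :: t).take 3 := by
    rw [PySem.List.slice_toNat _ (by omega) (by omega)]; rfl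
  have l1 : PySem.List.len (c :: t) = (t.length : Int) + 1 := by simp [PySem.List.len_eq]
  have i1 : ((0:Int) ≥ (t.length : Int) + 1 - 2 ∨ t.take 2 ≠ ['n','t']) ↔
      ¬ (['n','t'].isPrefixOf t = true) := by
    rcases t with _ | ⟨x, _ | ⟨y, r⟩⟩
    · simp
    · simp [List.isPrefixOf]
    · have hlen : ¬ ((0:Int) ≥ ((x::y::r).length : Int) + 1 - 2) := by
        simp only [List.length_cons]; push_cast; omega
      simp [List.isPrefixOf]
      constructor
      · rintro (h | h)
        · exact absurd h (by omega)
        · exact fun p q => h p.symm q.symm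
      · intro h; exact Or.inr (fun p q => h p.symm q.symm)
  have i2 : ((0:Int) ≥ (t.length : Int) + 1 - 2 ∨ t.take 2 ≠ ['t','a']) ↔
      ¬ (['t','a'].isPrefixOf t = true) := by
    rcases t with _ | ⟨x, _ | ⟨y, r⟩⟩
    · simp
    · simp [List.isPrefixOf]
    · have hlen : ¬ ((0:Int) ≥ ((x::y::r).length : Int) + 1 - 2) := by
        simp only [List.length_cons]; push_cast; omega
      simp [List.isPrefixOf]
      constructor
      · rintro (h | h)
        · exact absurd h (by omega)
        · exact fun p q => h p.symm q.symm
      · intro h; exact Or.inr (fun p q => h p.symm q.symm)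
  have i3 : ((0:Int) ≥ (t.length : Int) + 1 - 1 ∨ t.getD 0 ' ' ≠ 'a') ↔
      ¬ (['a'].isPrefixOf t = true) := by
    rcases t with _ | ⟨x, r⟩
    · simp
    · have hlen : ¬ ((0:Int) ≥ ((x::r).length : Int) + 1 - 1) := by
        simp only [List.length_cons]; push_cast; omega
      simp [List.isPrefixOf]
      constructor
      · rintro (h | h)
        · exact absurd h (by omega)
        · exact fun p => h p.symm
      · intro h; exact Or.inr (fun p => h p.symm)
  have i4 : ((0:Int) < (t.length : Int) + 1 - 2 ∧ (c :: t).take 3 = ['a','n','t']) ↔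
      (['a','n','t'].isPrefixOf (c :: t) = true) := by
    rcases t with _ | ⟨x, _ | ⟨y, r⟩⟩
    · simp [List.isPrefixOf]
    · simp [List.isPrefixOf]
    · have hlen : ((0:Int) < ((x::y::r).length : Int) + 1 - 2) := by
        simp only [List.length_cons]; push_cast; omega
      simp [List.isPrefixOf]
      constructor
      · rintro ⟨_, h1, h2, h3⟩; exact ⟨h1.symm, h2.symm, h3.symm⟩
      · rintro ⟨h1, h2, h3⟩; exact ⟨by omega, h1.symm, h2.symm, h3.symm⟩
  simp only [antsStep, r0, r1, s1, s2, l1, i1, i2, i3, i4]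

theorem antsStep_shift (c : Char) (t : List Char) (st : Int × Int × Int × Int) (j : Nat) :
    antsStep (c :: t) st ((j : Int) + 1) = antsStep t st (j : Int) := by
  have dr : ∀ (a : Nat), List.drop (a + 1) (c :: t) = List.drop a t := fun a => rfl
  have k1 : PySem.List.slice (c :: t) (some ((j:Int)+1+1)) (some ((j:Int)+1+3)) =
      PySem.List.slice t (some ((j:Int)+1)) (some ((j:Int)+3)) := by
    rw [PySem.List.slice_toNat _ (by omega) (by omega), PySem.List.slice_toNat _ (by omega) (by omega)]
    rw [(by omega : ((j:Int)+1+1).toNat = j + 1 + 1), (by omega : ((j:Int)+1+3).toNat = j + 4),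
        (by omega : ((j:Int)+1).toNat = j + 1), (by omega : ((j:Int)+3).toNat = j + 3), dr]
    congr 1; omega
  have k2 : PySem.List.slice (c :: t) (some ((j:Int)+1)) (some ((j:Int)+1+3)) =
      PySem.List.slice t (some ((j:Int))) (some ((j:Int)+3)) := by
    rw [PySem.List.slice_toNat _ (by omega) (by omega), PySem.List.slice_toNat _ (by omega) (by omega)]
    rw [(by omega : ((j:Int)+1).toNat = j + 1), (by omega : ((j:Int)+1+3).toNat = j + 4),
        (by omega : ((j:Int)).toNat = j), (by omega : ((j:Int)+3).toNat = j + 3), dr]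
    congr 1; omega
  have g1 : PySem.List.pyGetD (c :: t) ((j:Int)+1) ' ' = PySem.List.pyGetD t (j:Int) ' ' := by
    rw [PySem.List.pyGetD_of_nonneg _ _ (by omega), PySem.List.pyGetD_of_nonneg _ _ (by omega),
        (by omega : ((j:Int)+1).toNat = j + 1), (by omega : ((j:Int)).toNat = j)]
    rfl
  have g2 : PySem.List.pyGetD (c :: t) ((j:Int)+1+1) ' ' = PySem.List.pyGetD t ((j:Int)+1) ' ' := by
    rw [PySem.List.pyGetD_of_nonneg _ _ (by omega), PySem.List.pyGetD_of_nonneg _ _ (by omega),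
        (by omega : ((j:Int)+1+1).toNat = j + 1 + 1), (by omega : ((j:Int)+1).toNat = j + 1)]
    rfl
  have l1 : PySem.List.len (c :: t) = PySem.List.len t + 1 := by
    simp [PySem.List.len_eq]
  have h1 : ((j:Int)+1 ≥ PySem.List.len t + 1 - 2) ↔ ((j:Int) ≥ PySem.List.len t - 2) := by
    constructor <;> intro <;> omega
  have h2 : ((j:Int)+1 ≥ PySem.List.len t + 1 - 1) ↔ ((j:Int) ≥ PySem.List.len t - 1) := by
    constructor <;> intro <;> omega
  have h3 : ((j:Int)+1 < PySem.List.len t + 1 - 2) ↔ ((j:Int) < PySem.List.len t - 2) := by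
    constructor <;> intro <;> omega
  simp only [antsStep, l1, k1, k2, g1, g2, h1, h2, h3]

def quad : List Char → Nat × Nat × Nat × Nat
  | [] => (0, 0, 0, 0)
  | c :: t =>
    let q := quad t
    if c = 'a' ∧ ¬ ['n','t'].isPrefixOf t then (q.1 + 1, q.2.1, q.2.2.1, q.2.2.2)
    else if c = 'n' ∧ ¬ ['t','a'].isPrefixOf t then (q.1, q.2.1 + 1, q.2.2.1, q.2.2.2)
    else if c = 't' ∧ ¬ ['a'].isPrefixOf t then (q.1, q.2.1, q.2.2.1 + 1, q.2.2.2)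
    else if ['a','n','t'].isPrefixOf (c :: t) then (q.1, q.2.1, q.2.2.1, q.2.2.2 + 1)
    else q

theorem loop_eq_quad (cs : List Char) : ∀ st : Int × Int × Int × Int,
    List.foldl (antsStep cs) st (List.map Int.ofNat (List.range cs.length)) =
      (st.1 + ((quad cs).1 : Int), st.2.1 + ((quad cs).2.1 : Int),
       st.2.2.1 + ((quad cs).2.2.1 : Int), st.2.2.2 + ((quad cs).2.2.2 : Int)) := by
  induction cs with
  | nil => intro st; simp [quad]
  | cons c t ih =>
    intro st
    rw [List.length_cons, List.range_succ_eq_map, List.map_cons, List.foldl_cons,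
        List.map_map, List.foldl_map]
    have hf : (fun (s : Int × Int × Int × Int) (k : Nat) => antsStep (c :: t) s ((Int.ofNat ∘ Nat.succ) k)) =
        (fun (s : Int × Int × Int × Int) (k : Nat) => antsStep t s (Int.ofNat k)) := by
      funext s k
      have e : (Int.ofNat ∘ Nat.succ) k = (k : Int) + 1 := by simp only [Function.comp_apply]; exact_mod_cast rfl
      rw [e]
      exact antsStep_shift c t s k
    rw [hf, ← List.foldl_map (f := Int.ofNat) (g := antsStep t), ih]
    simp only [Int.ofNat_eq_natCast, Nat.cast_zero]
    rw [antsStep_zero]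
    simp only [quad]
    split_ifs <;> simp <;> ring

theorem quad_sums (cs : List Char) :
    (quad cs).1 + occCnt ['a','n','t'] cs = occCnt ['a'] cs ∧
    (quad cs).2.1 + occCnt ['n','t','a'] cs = occCnt ['n'] cs ∧
    (quad cs).2.2.1 + occCnt ['t','a'] cs = occCnt ['t'] cs ∧
    (quad cs).2.2.2 = occCnt ['a','n','t'] cs := by
  induction cs with
  | nil => simp [quad, occCnt]
  | cons c t ih =>
    obtain ⟨h1, h2, h3, h4⟩ := ih
    simp only [quad, occCnt, List.isPrefixOf, Bool.and_eq_true, beq_iff_eq,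
      @eq_comm _ 'a' c, @eq_comm _ 'n' c, @eq_comm _ 't' c]
    by_cases ha : c = 'a' <;> by_cases hn : c = 'n' <;> by_cases ht : c = 't' <;>
      by_cases p1 : ['n','t'].isPrefixOf t <;> by_cases p2 : ['t','a'].isPrefixOf t <;>
      by_cases p3 : ['a'].isPrefixOf t <;>
      simp [ha, hn, ht, p1, p2, p3] <;> omega

-- ===== VERDICT =====
theorem antsfunction_spec : Claim_equal_antsfunction := by
  intro ants _
  unfold Spec_antsfunction antsfunction antsfunction_alt
  dsimp only
  have hb : PySem.List.pyRange 0 (PySem.List.len ants.toList) 1 =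
      List.map Int.ofNat (List.range ants.toList.length) := by
    rw [PySem.List.len_eq, PySem.List.pyRange_zero_natCast]
    rfl
  rw [hb, loop_eq_quad]
  have hskipA : ∀ l : List Char, ['a'].isPrefixOf l = true →
      occCnt ['a'] l = 1 + occCnt ['a'] (l.drop 1) := by
    intro l h; rcases l with _ | ⟨c, r⟩ <;> simp_all [occCnt, List.isPrefixOf] <;> tauto
  have hskipN : ∀ l : List Char, ['n'].isPrefixOf l = true →
      occCnt ['n'] l = 1 + occCnt ['n'] (l.drop 1) := by
    intro l h; rcases l with _ | ⟨c, r⟩ <;> simp_all [occCnt, List.isPrefixOf] <;> tauto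
  have hskipT : ∀ l : List Char, ['t'].isPrefixOf l = true →
      occCnt ['t'] l = 1 + occCnt ['t'] (l.drop 1) := by
    intro l h; rcases l with _ | ⟨c, r⟩ <;> simp_all [occCnt, List.isPrefixOf] <;> tauto
  have hskipANT : ∀ l : List Char, ['a','n','t'].isPrefixOf l = true →
      occCnt ['a','n','t'] l = 1 + occCnt ['a','n','t'] (l.drop 3) := by
    intro l h
    rcases l with _ | ⟨c, _ | ⟨d, _ | ⟨e, r⟩⟩⟩ <;> simp_all [occCnt, List.isPrefixOf]
    obtain ⟨rfl, rfl, rfl⟩ := h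
    simp
  have hskipNTA : ∀ l : List Char, ['n','t','a'].isPrefixOf l = true →
      occCnt ['n','t','a'] l = 1 + occCnt ['n','t','a'] (l.drop 3) := by
    intro l h
    rcases l with _ | ⟨c, _ | ⟨d, _ | ⟨e, r⟩⟩⟩ <;> simp_all [occCnt, List.isPrefixOf]
    obtain ⟨rfl, rfl, rfl⟩ := h
    simp
  have hskipTA : ∀ l : List Char, ['t','a'].isPrefixOf l = true →
      occCnt ['t','a'] l = 1 + occCnt ['t','a'] (l.drop 2) := by
    intro l h
    rcases l with _ | ⟨c, _ | ⟨d, r⟩⟩ <;> simp_all [occCnt, List.isPrefixOf]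
    obtain ⟨rfl, rfl⟩ := h
    simp
  have cA := count_eq_occCnt ['a'] ants.toList (by simp) hskipA
  have cN := count_eq_occCnt ['n'] ants.toList (by simp) hskipN
  have cT := count_eq_occCnt ['t'] ants.toList (by simp) hskipT
  have cANT := count_eq_occCnt ['a','n','t'] ants.toList (by simp) hskipANT
  have cNTA := count_eq_occCnt ['n','t','a'] ants.toList (by simp) hskipNTA
  have cTA := count_eq_occCnt ['t','a'] ants.toList (by simp) hskipTA
  have e1 : "ant".toList = ['a','n','t'] := by decide
  have e2 : "a".toList = ['a'] := by decide
  have e3 : "n".toList = ['n'] := by decide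
  have e4 : "t".toList = ['t'] := by decide
  have e5 : "nta".toList = ['n','t','a'] := by decide
  have e6 : "ta".toList = ['t','a'] := by decide
  simp only [PySem.Str.count_eq, e1, e2, e3, e4, e5, e6, cA, cN, cT, cANT, cNTA, cTA]
  obtain ⟨q1, q2, q3, q4⟩ := quad_sums ants.toList
  have g1 : ((quad ants.toList).1 : Int) = (occCnt ['a'] ants.toList : Int) - (occCnt ['a','n','t'] ants.toList : Int) := by omega
  have g2 : ((quad ants.toList).2.1 : Int) = (occCnt ['n'] ants.toList : Int) - (occCnt ['n','t','a'] ants.toList : Int) := by omega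
  have g3 : ((quad ants.toList).2.2.1 : Int) = (occCnt ['t'] ants.toList : Int) - (occCnt ['t','a'] ants.toList : Int) := by omega
  have g4 : ((quad ants.toList).2.2.2 : Int) = (occCnt ['a','n','t'] ants.toList : Int) := by omega
  simp only [zero_add, g1, g2, g3, g4]
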